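-- pv_equiv track=rewrite | github.com/nihilistau/shannon-prime | tools/sp_diagnostics.py | _is_sqfree_rich
-- ===== SOURCE A (Python) =====
-- def _is_sqfree_rich(n: int, min_distinct: int = 3) -> bool:
--     distinct, d = 0, n
--     for p in [2, 3, 5, 7, 11]:
--         if d % p == 0:
--             distinct += 1
--             d //= p
--             if d % p == 0:
--                 return False
--     return d == 1 and distinct >= min_distinct
-- ===== SOURCE B (Python) =====
-- # B: the accepted values of n are exactly the 32 products of distinct subsets of
-- # {2,3,5,7,11}; precompute them once with their subset sizes and answer by lookup.
-- _TABLE = [(1, 0)]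
-- for _p in (2, 3, 5, 7, 11):
--     _TABLE += [(prod * _p, k + 1) for (prod, k) in _TABLE]
--
--
-- def _is_sqfree_rich(n: int, min_distinct: int = 3) -> bool:
--     for prod, k in _TABLE:
--         if prod == n:
--             return k >= min_distinct
--     return False
-- ===== Notes on version B (the rewrite author's own statement) =====
-- stated objective: alternative
-- what changed: A's trial-division loop (divide n by each small prime, early-return on a repeated factor) is replaced by a precomputed 32-entry table of all products of distinct subsets of {2,3,5,7,11} with their subset sizes; the function is a pure table lookup with no runtime division.
import Mathlib
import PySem

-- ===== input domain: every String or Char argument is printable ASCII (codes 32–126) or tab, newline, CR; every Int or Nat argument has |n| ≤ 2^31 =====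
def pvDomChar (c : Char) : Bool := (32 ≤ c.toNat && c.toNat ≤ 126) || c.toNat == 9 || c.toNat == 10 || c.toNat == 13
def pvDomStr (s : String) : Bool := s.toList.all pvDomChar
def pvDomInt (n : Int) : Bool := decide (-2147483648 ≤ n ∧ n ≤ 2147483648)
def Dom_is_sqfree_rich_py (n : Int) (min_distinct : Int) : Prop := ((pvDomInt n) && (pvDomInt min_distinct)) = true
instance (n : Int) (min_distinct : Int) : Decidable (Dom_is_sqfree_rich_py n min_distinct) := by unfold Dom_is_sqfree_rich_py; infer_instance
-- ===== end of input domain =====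

-- B replaces A's trial-division loop by a precomputed 32-entry table of all products of
-- distinct subsets of {2,3,5,7,11} with their subset sizes, answered by pure lookup
-- (objective: alternative; no runtime modular arithmetic).

-- ===== PORT A =====
-- the for-loop of A: state (distinct, d), early return False on a repeated factor
def pvLoopA : List Int → Int → Int → Int → Bool
  | [], distinct, d, min_distinct => (d == 1) && (decide (min_distinct ≤ distinct))
  | p :: ps, distinct, d, min_distinct =>
    if PySem.Int.mod d p == 0 then
      if PySem.Int.mod (PySem.Int.floordiv d p) p == 0 then false
      else pvLoopA ps (distinct + 1) (PySem.Int.floordiv d p) min_distinct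
    else pvLoopA ps distinct d min_distinct

def is_sqfree_rich_py (n : Int) (min_distinct : Int) : Bool :=
  pvLoopA [2, 3, 5, 7, 11] 0 n min_distinct

-- ===== PORT B =====
-- module-level _TABLE of Source B: powerset products of (2,3,5,7,11) with subset sizes
def pvTableB : List (Int × Int) :=
  ([2, 3, 5, 7, 11] : List Int).foldl
    (fun t p => t ++ t.map (fun e => (e.1 * p, e.2 + 1))) [(1, 0)]

-- the for-loop of _is_sqfree_rich in Source B: first matching product wins, else False
def pvLookupB : List (Int × Int) → Int → Int → Bool
  | [], _, _ => false
  | (prod, k) :: rest, n, min_distinct =>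
    if prod == n then decide (min_distinct ≤ k) else pvLookupB rest n min_distinct

def is_sqfree_rich_py_alt (n : Int) (min_distinct : Int) : Bool :=
  pvLookupB pvTableB n min_distinct

-- ===== PRECONDITION & SPEC =====
def Spec_is_sqfree_rich_py (n : Int) (min_distinct : Int) (out : Bool) : Prop := out = is_sqfree_rich_py_alt n min_distinct
instance (n : Int) (min_distinct : Int) (out : Bool) : Decidable (Spec_is_sqfree_rich_py n min_distinct out) := by unfold Spec_is_sqfree_rich_py; infer_instance

-- ===== CLAIM (what is proved, stated in full; the proofs are below) =====
def Claim_equal_is_sqfree_rich_py : Prop := ∀ (n : Int) (min_distinct : Int), Dom_is_sqfree_rich_py n min_distinct → Spec_is_sqfree_rich_py n min_distinct (is_sqfree_rich_py n min_distinct)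

-- ===== LEMMAS AND PROOFS =====
theorem pv_mod_eq (a b : Int) (hb : 0 < b) : PySem.Int.mod a b = a % b :=
  PySem.Int.mod_eq_emod_of_pos hb

theorem pv_fd_eq (a b : Int) (hb : 0 < b) : PySem.Int.floordiv a b = a / b :=
  PySem.Int.floordiv_eq_ediv_of_pos hb

theorem pvTableB_eq : pvTableB = [(1, 0), (2, 1), (3, 1), (6, 2), (5, 1), (10, 2), (15, 2), (30, 3), (7, 1), (14, 2), (21, 2), (42, 3), (35, 2), (70, 3), (105, 3), (210, 4), (11, 1), (22, 2), (33, 2), (66, 3), (55, 2), (110, 3), (165, 3), (330, 4), (77, 2), (154, 3), (231, 3), (462, 4), (385, 3), (770, 4), (1155, 4), (2310, 5)] := by rfl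

-- lookup misses every entry when n differs from all 32 table products
theorem pv_none (n m : Int) (h : n ≠ 1 ∧ n ≠ 2 ∧ n ≠ 3 ∧ n ≠ 6 ∧ n ≠ 5 ∧ n ≠ 10 ∧ n ≠ 15 ∧ n ≠ 30 ∧ n ≠ 7 ∧ n ≠ 14 ∧ n ≠ 21 ∧ n ≠ 42 ∧ n ≠ 35 ∧ n ≠ 70 ∧ n ≠ 105 ∧ n ≠ 210 ∧ n ≠ 11 ∧ n ≠ 22 ∧ n ≠ 33 ∧ n ≠ 66 ∧ n ≠ 55 ∧ n ≠ 110 ∧ n ≠ 165 ∧ n ≠ 330 ∧ n ≠ 77 ∧ n ≠ 154 ∧ n ≠ 231 ∧ n ≠ 462 ∧ n ≠ 385 ∧ n ≠ 770 ∧ n ≠ 1155 ∧ n ≠ 2310) :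
    pvLookupB [(1, 0), (2, 1), (3, 1), (6, 2), (5, 1), (10, 2), (15, 2), (30, 3), (7, 1), (14, 2), (21, 2), (42, 3), (35, 2), (70, 3), (105, 3), (210, 4), (11, 1), (22, 2), (33, 2), (66, 3), (55, 2), (110, 3), (165, 3), (330, 4), (77, 2), (154, 3), (231, 3), (462, 4), (385, 3), (770, 4), (1155, 4), (2310, 5)] n m = false := by
  simp only [pvLookupB, beq_iff_eq]
  rw [if_neg (Ne.symm h.1), if_neg (Ne.symm h.2.1), if_neg (Ne.symm h.2.2.1), if_neg (Ne.symm h.2.2.2.1), if_neg (Ne.symm h.2.2.2.2.1), if_neg (Ne.symm h.2.2.2.2.2.1), if_neg (Ne.symm h.2.2.2.2.2.2.1), if_neg (Ne.symm h.2.2.2.2.2.2.2.1), if_neg (Ne.symm h.2.2.2.2.2.2.2.2.1), if_neg (Ne.symm h.2.2.2.2.2.2.2.2.2.1), if_neg (Ne.symm h.2.2.2.2.2.2.2.2.2.2.1), if_neg (Ne.symm h.2.2.2.2.2.2.2.2.2.2.2.1), if_neg (Ne.symm h.2.2.2.2.2.2.2.2.2.2.2.2.1), if_neg (Ne.symm h.2.2.2.2.2.2.2.2.2.2.2.2.2.1),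 if_neg (Ne.symm h.2.2.2.2.2.2.2.2.2.2.2.2.2.2.1), if_neg (Ne.symm h.2.2.2.2.2.2.2.2.2.2.2.2.2.2.2.1), if_neg (Ne.symm h.2.2.2.2.2.2.2.2.2.2.2.2.2.2.2.2.1), if_neg (Ne.symm h.2.2.2.2.2.2.2.2.2.2.2.2.2.2.2.2.2.1), if_neg (Ne.symm h.2.2.2.2.2.2.2.2.2.2.2.2.2.2.2.2.2.2.1), if_neg (Ne.symm h.2.2.2.2.2.2.2.2.2.2.2.2.2.2.2.2.2.2.2.1), if_neg (Ne.symm h.2.2.2.2.2.2.2.2.2.2.2.2.2.2.2.2.2.2.2.2.1), if_neg (Ne.symm h.2.2.2.2.2.2.2.2.2.2.2.2.2.2.2.2.2.2.2.2.2.1), if_neg (Ne.symm h.2.2.2.2.2.2.2.2.2.2.2.2.2.2.2.2.2.2.2.2.2.2.1), if_neg (Ne.symm h.2.2.2.2.2.2.2.2.2.2.2.2.2.2.2.2.2.2.2.2.2.2.2.1), if_neg (Ne.symm h.2.2.2.2.2.2.2.2.2.2.2.2.2.2.2.2.2.2.2.2.2.2.2.2.1), if_neg (Ne.symm h.2.2.2.2.2.2.2.2.2.2.2.2.2.2.2.2.2.2.2.2.2.2.2.2.2.1),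 if_neg (Ne.symm h.2.2.2.2.2.2.2.2.2.2.2.2.2.2.2.2.2.2.2.2.2.2.2.2.2.2.1), if_neg (Ne.symm h.2.2.2.2.2.2.2.2.2.2.2.2.2.2.2.2.2.2.2.2.2.2.2.2.2.2.2.1), if_neg (Ne.symm h.2.2.2.2.2.2.2.2.2.2.2.2.2.2.2.2.2.2.2.2.2.2.2.2.2.2.2.2.1), if_neg (Ne.symm h.2.2.2.2.2.2.2.2.2.2.2.2.2.2.2.2.2.2.2.2.2.2.2.2.2.2.2.2.2.1), if_neg (Ne.symm h.2.2.2.2.2.2.2.2.2.2.2.2.2.2.2.2.2.2.2.2.2.2.2.2.2.2.2.2.2.2.1), if_neg (Ne.symm h.2.2.2.2.2.2.2.2.2.2.2.2.2.2.2.2.2.2.2.2.2.2.2.2.2.2.2.2.2.2.2)]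

set_option maxHeartbeats 4000000 in
theorem pv_main (n m : Int) :
    is_sqfree_rich_py n m = is_sqfree_rich_py_alt n m := by
  unfold is_sqfree_rich_py is_sqfree_rich_py_alt
  rw [pvTableB_eq]
  simp only [pvLoopA]
  simp only [pv_mod_eq _ 2 (by norm_num), pv_mod_eq _ 3 (by norm_num),
    pv_mod_eq _ 5 (by norm_num), pv_mod_eq _ 7 (by norm_num),
    pv_mod_eq _ 11 (by norm_num)]
  simp only [pv_fd_eq _ 2 (by norm_num), pv_fd_eq _ 3 (by norm_num),
    pv_fd_eq _ 5 (by norm_num), pv_fd_eq _ 7 (by norm_num),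
    pv_fd_eq _ 11 (by norm_num)]
  simp only [beq_iff_eq]
  by_cases h1 : n % 2 = 0
  · rw [if_pos h1]
    by_cases h2 : n / 2 % 2 = 0
    · rw [if_pos h2]
      exact (pv_none n m (by omega)).symm
    · rw [if_neg h2]
      by_cases h3 : n / 2 % 3 = 0
      · rw [if_pos h3]
        by_cases h4 : n / 2 / 3 % 3 = 0
        · rw [if_pos h4]
          exact (pv_none n m (by omega)).symm
        · rw [if_neg h4]
          by_cases h5 : n / 2 / 3 % 5 = 0
          · rw [if_pos h5]
            by_cases h6 : n / 2 / 3 / 5 % 5 = 0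
            · rw [if_pos h6]
              exact (pv_none n m (by omega)).symm
            · rw [if_neg h6]
              by_cases h7 : n / 2 / 3 / 5 % 7 = 0
              · rw [if_pos h7]
                by_cases h8 : n / 2 / 3 / 5 / 7 % 7 = 0
                · rw [if_pos h8]
                  exact (pv_none n m (by omega)).symm
                · rw [if_neg h8]
                  by_cases h9 : n / 2 / 3 / 5 / 7 % 11 = 0
                  · rw [if_pos h9]
                    by_cases h10 : n / 2 / 3 / 5 / 7 / 11 % 11 = 0
                    · rw [if_pos h10]
                      exact (pv_none n m (by omega)).symm
                    · rw [if_neg h10]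
                      by_cases hn : n = 2310
                      · subst hn; rfl
                      · rw [pv_none n m (by omega), Bool.eq_iff_iff]
                        simp only [Bool.and_eq_true, beq_iff_eq, decide_eq_true_eq, Bool.false_eq_true, iff_false, not_and]
                        omega
                  · rw [if_neg h9]
                    by_cases hn : n = 210
                    · subst hn; rfl
                    · rw [pv_none n m (by omega), Bool.eq_iff_iff]
                      simp only [Bool.and_eq_true, beq_iff_eq, decide_eq_true_eq, Bool.false_eq_true, iff_false, not_and]
                      omega
              · rw [if_neg h7]
                by_cases h11 : n / 2 / 3 / 5 % 11 = 0
                · rw [if_pos h11]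
                  by_cases h12 : n / 2 / 3 / 5 / 11 % 11 = 0
                  · rw [if_pos h12]
                    exact (pv_none n m (by omega)).symm
                  · rw [if_neg h12]
                    by_cases hn : n = 330
                    · subst hn; rfl
                    · rw [pv_none n m (by omega), Bool.eq_iff_iff]
                      simp only [Bool.and_eq_true, beq_iff_eq, decide_eq_true_eq, Bool.false_eq_true, iff_false, not_and]
                      omega
                · rw [if_neg h11]
                  by_cases hn : n = 30
                  · subst hn; rfl
                  · rw [pv_none n m (by omega), Bool.eq_iff_iff]
                    simp only [Bool.and_eq_true, beq_iff_eq, decide_eq_true_eq, Bool.false_eq_true, iff_false, not_and]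
                    omega
          · rw [if_neg h5]
            by_cases h13 : n / 2 / 3 % 7 = 0
            · rw [if_pos h13]
              by_cases h14 : n / 2 / 3 / 7 % 7 = 0
              · rw [if_pos h14]
                exact (pv_none n m (by omega)).symm
              · rw [if_neg h14]
                by_cases h15 : n / 2 / 3 / 7 % 11 = 0
                · rw [if_pos h15]
                  by_cases h16 : n / 2 / 3 / 7 / 11 % 11 = 0
                  · rw [if_pos h16]
                    exact (pv_none n m (by omega)).symm
                  · rw [if_neg h16]
                    by_cases hn : n = 462
                    · subst hn; rfl
                    · rw [pv_none n m (by omega), Bool.eq_iff_iff]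
                      simp only [Bool.and_eq_true, beq_iff_eq, decide_eq_true_eq, Bool.false_eq_true, iff_false, not_and]
                      omega
                · rw [if_neg h15]
                  by_cases hn : n = 42
                  · subst hn; rfl
                  · rw [pv_none n m (by omega), Bool.eq_iff_iff]
                    simp only [Bool.and_eq_true, beq_iff_eq, decide_eq_true_eq, Bool.false_eq_true, iff_false, not_and]
                    omega
            · rw [if_neg h13]
              by_cases h17 : n / 2 / 3 % 11 = 0
              · rw [if_pos h17]
                by_cases h18 : n / 2 / 3 / 11 % 11 = 0
                · rw [if_pos h18]
                  exact (pv_none n m (by omega)).symm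
                · rw [if_neg h18]
                  by_cases hn : n = 66
                  · subst hn; rfl
                  · rw [pv_none n m (by omega), Bool.eq_iff_iff]
                    simp only [Bool.and_eq_true, beq_iff_eq, decide_eq_true_eq, Bool.false_eq_true, iff_false, not_and]
                    omega
              · rw [if_neg h17]
                by_cases hn : n = 6
                · subst hn; rfl
                · rw [pv_none n m (by omega), Bool.eq_iff_iff]
                  simp only [Bool.and_eq_true, beq_iff_eq, decide_eq_true_eq, Bool.false_eq_true, iff_false, not_and]
                  omega
      · rw [if_neg h3]
        by_cases h19 : n / 2 % 5 = 0
        · rw [if_pos h19]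
          by_cases h20 : n / 2 / 5 % 5 = 0
          · rw [if_pos h20]
            exact (pv_none n m (by omega)).symm
          · rw [if_neg h20]
            by_cases h21 : n / 2 / 5 % 7 = 0
            · rw [if_pos h21]
              by_cases h22 : n / 2 / 5 / 7 % 7 = 0
              · rw [if_pos h22]
                exact (pv_none n m (by omega)).symm
              · rw [if_neg h22]
                by_cases h23 : n / 2 / 5 / 7 % 11 = 0
                · rw [if_pos h23]
                  by_cases h24 : n / 2 / 5 / 7 / 11 % 11 = 0
                  · rw [if_pos h24]
                    exact (pv_none n m (by omega)).symm
                  · rw [if_neg h24]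
                    by_cases hn : n = 770
                    · subst hn; rfl
                    · rw [pv_none n m (by omega), Bool.eq_iff_iff]
                      simp only [Bool.and_eq_true, beq_iff_eq, decide_eq_true_eq, Bool.false_eq_true, iff_false, not_and]
                      omega
                · rw [if_neg h23]
                  by_cases hn : n = 70
                  · subst hn; rfl
                  · rw [pv_none n m (by omega), Bool.eq_iff_iff]
                    simp only [Bool.and_eq_true, beq_iff_eq, decide_eq_true_eq, Bool.false_eq_true, iff_false, not_and]
                    omega
            · rw [if_neg h21]
              by_cases h25 : n / 2 / 5 % 11 = 0
              · rw [if_pos h25]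
                by_cases h26 : n / 2 / 5 / 11 % 11 = 0
                · rw [if_pos h26]
                  exact (pv_none n m (by omega)).symm
                · rw [if_neg h26]
                  by_cases hn : n = 110
                  · subst hn; rfl
                  · rw [pv_none n m (by omega), Bool.eq_iff_iff]
                    simp only [Bool.and_eq_true, beq_iff_eq, decide_eq_true_eq, Bool.false_eq_true, iff_false, not_and]
                    omega
              · rw [if_neg h25]
                by_cases hn : n = 10
                · subst hn; rfl
                · rw [pv_none n m (by omega), Bool.eq_iff_iff]
                  simp only [Bool.and_eq_true, beq_iff_eq, decide_eq_true_eq, Bool.false_eq_true, iff_false, not_and]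
                  omega
        · rw [if_neg h19]
          by_cases h27 : n / 2 % 7 = 0
          · rw [if_pos h27]
            by_cases h28 : n / 2 / 7 % 7 = 0
            · rw [if_pos h28]
              exact (pv_none n m (by omega)).symm
            · rw [if_neg h28]
              by_cases h29 : n / 2 / 7 % 11 = 0
              · rw [if_pos h29]
                by_cases h30 : n / 2 / 7 / 11 % 11 = 0
                · rw [if_pos h30]
                  exact (pv_none n m (by omega)).symm
                · rw [if_neg h30]
                  by_cases hn : n = 154
                  · subst hn; rfl
                  · rw [pv_none n m (by omega), Bool.eq_iff_iff]
                    simp only [Bool.and_eq_true, beq_iff_eq, decide_eq_true_eq, Bool.false_eq_true, iff_false, not_and]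
                    omega
              · rw [if_neg h29]
                by_cases hn : n = 14
                · subst hn; rfl
                · rw [pv_none n m (by omega), Bool.eq_iff_iff]
                  simp only [Bool.and_eq_true, beq_iff_eq, decide_eq_true_eq, Bool.false_eq_true, iff_false, not_and]
                  omega
          · rw [if_neg h27]
            by_cases h31 : n / 2 % 11 = 0
            · rw [if_pos h31]
              by_cases h32 : n / 2 / 11 % 11 = 0
              · rw [if_pos h32]
                exact (pv_none n m (by omega)).symm
              · rw [if_neg h32]
                by_cases hn : n = 22
                · subst hn; rfl
                · rw [pv_none n m (by omega), Bool.eq_iff_iff]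
                  simp only [Bool.and_eq_true, beq_iff_eq, decide_eq_true_eq, Bool.false_eq_true, iff_false, not_and]
                  omega
            · rw [if_neg h31]
              by_cases hn : n = 2
              · subst hn; rfl
              · rw [pv_none n m (by omega), Bool.eq_iff_iff]
                simp only [Bool.and_eq_true, beq_iff_eq, decide_eq_true_eq, Bool.false_eq_true, iff_false, not_and]
                omega
  · rw [if_neg h1]
    by_cases h33 : n % 3 = 0
    · rw [if_pos h33]
      by_cases h34 : n / 3 % 3 = 0
      · rw [if_pos h34]
        exact (pv_none n m (by omega)).symm
      · rw [if_neg h34]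
        by_cases h35 : n / 3 % 5 = 0
        · rw [if_pos h35]
          by_cases h36 : n / 3 / 5 % 5 = 0
          · rw [if_pos h36]
            exact (pv_none n m (by omega)).symm
          · rw [if_neg h36]
            by_cases h37 : n / 3 / 5 % 7 = 0
            · rw [if_pos h37]
              by_cases h38 : n / 3 / 5 / 7 % 7 = 0
              · rw [if_pos h38]
                exact (pv_none n m (by omega)).symm
              · rw [if_neg h38]
                by_cases h39 : n / 3 / 5 / 7 % 11 = 0
                · rw [if_pos h39]
                  by_cases h40 : n / 3 / 5 / 7 / 11 % 11 = 0
                  · rw [if_pos h40]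
                    exact (pv_none n m (by omega)).symm
                  · rw [if_neg h40]
                    by_cases hn : n = 1155
                    · subst hn; rfl
                    · rw [pv_none n m (by omega), Bool.eq_iff_iff]
                      simp only [Bool.and_eq_true, beq_iff_eq, decide_eq_true_eq, Bool.false_eq_true, iff_false, not_and]
                      omega
                · rw [if_neg h39]
                  by_cases hn : n = 105
                  · subst hn; rfl
                  · rw [pv_none n m (by omega), Bool.eq_iff_iff]
                    simp only [Bool.and_eq_true, beq_iff_eq, decide_eq_true_eq, Bool.false_eq_true, iff_false, not_and]
                    omega
            · rw [if_neg h37]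
              by_cases h41 : n / 3 / 5 % 11 = 0
              · rw [if_pos h41]
                by_cases h42 : n / 3 / 5 / 11 % 11 = 0
                · rw [if_pos h42]
                  exact (pv_none n m (by omega)).symm
                · rw [if_neg h42]
                  by_cases hn : n = 165
                  · subst hn; rfl
                  · rw [pv_none n m (by omega), Bool.eq_iff_iff]
                    simp only [Bool.and_eq_true, beq_iff_eq, decide_eq_true_eq, Bool.false_eq_true, iff_false, not_and]
                    omega
              · rw [if_neg h41]
                by_cases hn : n = 15
                · subst hn; rfl
                · rw [pv_none n m (by omega), Bool.eq_iff_iff]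
                  simp only [Bool.and_eq_true, beq_iff_eq, decide_eq_true_eq, Bool.false_eq_true, iff_false, not_and]
                  omega
        · rw [if_neg h35]
          by_cases h43 : n / 3 % 7 = 0
          · rw [if_pos h43]
            by_cases h44 : n / 3 / 7 % 7 = 0
            · rw [if_pos h44]
              exact (pv_none n m (by omega)).symm
            · rw [if_neg h44]
              by_cases h45 : n / 3 / 7 % 11 = 0
              · rw [if_pos h45]
                by_cases h46 : n / 3 / 7 / 11 % 11 = 0
                · rw [if_pos h46]
                  exact (pv_none n m (by omega)).symm
                · rw [if_neg h46]
                  by_cases hn : n = 231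
                  · subst hn; rfl
                  · rw [pv_none n m (by omega), Bool.eq_iff_iff]
                    simp only [Bool.and_eq_true, beq_iff_eq, decide_eq_true_eq, Bool.false_eq_true, iff_false, not_and]
                    omega
              · rw [if_neg h45]
                by_cases hn : n = 21
                · subst hn; rfl
                · rw [pv_none n m (by omega), Bool.eq_iff_iff]
                  simp only [Bool.and_eq_true, beq_iff_eq, decide_eq_true_eq, Bool.false_eq_true, iff_false, not_and]
                  omega
          · rw [if_neg h43]
            by_cases h47 : n / 3 % 11 = 0
            · rw [if_pos h47]
              by_cases h48 : n / 3 / 11 % 11 = 0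
              · rw [if_pos h48]
                exact (pv_none n m (by omega)).symm
              · rw [if_neg h48]
                by_cases hn : n = 33
                · subst hn; rfl
                · rw [pv_none n m (by omega), Bool.eq_iff_iff]
                  simp only [Bool.and_eq_true, beq_iff_eq, decide_eq_true_eq, Bool.false_eq_true, iff_false, not_and]
                  omega
            · rw [if_neg h47]
              by_cases hn : n = 3
              · subst hn; rfl
              · rw [pv_none n m (by omega), Bool.eq_iff_iff]
                simp only [Bool.and_eq_true, beq_iff_eq, decide_eq_true_eq, Bool.false_eq_true, iff_false, not_and]
                omega
    · rw [if_neg h33]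
      by_cases h49 : n % 5 = 0
      · rw [if_pos h49]
        by_cases h50 : n / 5 % 5 = 0
        · rw [if_pos h50]
          exact (pv_none n m (by omega)).symm
        · rw [if_neg h50]
          by_cases h51 : n / 5 % 7 = 0
          · rw [if_pos h51]
            by_cases h52 : n / 5 / 7 % 7 = 0
            · rw [if_pos h52]
              exact (pv_none n m (by omega)).symm
            · rw [if_neg h52]
              by_cases h53 : n / 5 / 7 % 11 = 0
              · rw [if_pos h53]
                by_cases h54 : n / 5 / 7 / 11 % 11 = 0
                · rw [if_pos h54]
                  exact (pv_none n m (by omega)).symm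
                · rw [if_neg h54]
                  by_cases hn : n = 385
                  · subst hn; rfl
                  · rw [pv_none n m (by omega), Bool.eq_iff_iff]
                    simp only [Bool.and_eq_true, beq_iff_eq, decide_eq_true_eq, Bool.false_eq_true, iff_false, not_and]
                    omega
              · rw [if_neg h53]
                by_cases hn : n = 35
                · subst hn; rfl
                · rw [pv_none n m (by omega), Bool.eq_iff_iff]
                  simp only [Bool.and_eq_true, beq_iff_eq, decide_eq_true_eq, Bool.false_eq_true, iff_false, not_and]
                  omega
          · rw [if_neg h51]
            by_cases h55 : n / 5 % 11 = 0
            · rw [if_pos h55]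
              by_cases h56 : n / 5 / 11 % 11 = 0
              · rw [if_pos h56]
                exact (pv_none n m (by omega)).symm
              · rw [if_neg h56]
                by_cases hn : n = 55
                · subst hn; rfl
                · rw [pv_none n m (by omega), Bool.eq_iff_iff]
                  simp only [Bool.and_eq_true, beq_iff_eq, decide_eq_true_eq, Bool.false_eq_true, iff_false, not_and]
                  omega
            · rw [if_neg h55]
              by_cases hn : n = 5
              · subst hn; rfl
              · rw [pv_none n m (by omega), Bool.eq_iff_iff]
                simp only [Bool.and_eq_true, beq_iff_eq, decide_eq_true_eq, Bool.false_eq_true, iff_false, not_and]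
                omega
      · rw [if_neg h49]
        by_cases h57 : n % 7 = 0
        · rw [if_pos h57]
          by_cases h58 : n / 7 % 7 = 0
          · rw [if_pos h58]
            exact (pv_none n m (by omega)).symm
          · rw [if_neg h58]
            by_cases h59 : n / 7 % 11 = 0
            · rw [if_pos h59]
              by_cases h60 : n / 7 / 11 % 11 = 0
              · rw [if_pos h60]
                exact (pv_none n m (by omega)).symm
              · rw [if_neg h60]
                by_cases hn : n = 77
                · subst hn; rfl
                · rw [pv_none n m (by omega), Bool.eq_iff_iff]
                  simp only [Bool.and_eq_true, beq_iff_eq, decide_eq_true_eq, Bool.false_eq_true, iff_false, not_and]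
                  omega
            · rw [if_neg h59]
              by_cases hn : n = 7
              · subst hn; rfl
              · rw [pv_none n m (by omega), Bool.eq_iff_iff]
                simp only [Bool.and_eq_true, beq_iff_eq, decide_eq_true_eq, Bool.false_eq_true, iff_false, not_and]
                omega
        · rw [if_neg h57]
          by_cases h61 : n % 11 = 0
          · rw [if_pos h61]
            by_cases h62 : n / 11 % 11 = 0
            · rw [if_pos h62]
              exact (pv_none n m (by omega)).symm
            · rw [if_neg h62]
              by_cases hn : n = 11
              · subst hn; rfl
              · rw [pv_none n m (by omega), Bool.eq_iff_iff]
                simp only [Bool.and_eq_true, beq_iff_eq, decide_eq_true_eq, Bool.false_eq_true, iff_false, not_and]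
                omega
          · rw [if_neg h61]
            by_cases hn : n = 1
            · subst hn; rfl
            · rw [pv_none n m (by omega), Bool.eq_iff_iff]
              simp only [Bool.and_eq_true, beq_iff_eq, decide_eq_true_eq, Bool.false_eq_true, iff_false, not_and]
              omega

-- ===== VERDICT (by name: the statement is the Claim_ definition above) =====
theorem is_sqfree_rich_py_spec : Claim_equal_is_sqfree_rich_py := by
  intro n m _
  unfold Spec_is_sqfree_rich_py
  exact pv_main n m
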